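-- pv_equiv track=rewrite | github.com/baixinbs/py_data_extraction | matchers/match_time_value.py | match_time_value
-- ===== SOURCE A (Python) =====
-- def match_time_value(sentence):
--     keyword_set = {'minutes', 'minute', 'second', 'seconds', 'day', 'days', 'month', 'months', 'months'
--                    'year', 'years', 'hour', 'hours', 'min', 'h', 'hr', 'hrs', 'd', 's'}
--     rst = []
--     if len(sentence) <= 1:
--         return rst
--     for keyw in keyword_set:
--         len_keyw = len(keyw.split(' '))
--         for i in range(len(sentence) - len_keyw):
--             words = []
--             for j in range(len_keyw):
--                 words.append(sentence[i+j])
--             words = ' '.join(words)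
--             if words == keyw:
--                 rst.append((i, i+len_keyw, 'TV', keyw))
--     return rst
-- ===== SOURCE B (Python) =====
-- def match_time_value(sentence):
--     keyword_set = {'minutes', 'minute', 'second', 'seconds', 'day', 'days', 'month', 'months', 'months'
--                    'year', 'years', 'hour', 'hours', 'min', 'h', 'hr', 'hrs', 'd', 's'}
--     if len(sentence) <= 1:
--         return []
--     return [(i, i + 1, 'TV', w) for i, w in enumerate(sentence[:-1]) if w in keyword_set]
-- ===== Notes on version B (the rewrite author's own statement) =====
-- stated objective: faster
-- what changed: Replaces A's outer loop over the 18-element keyword set (each re-scanning the whole sentence) with a single left-to-right pass over the sentence testing set membership, so the sentence is traversed once instead of 18 times.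
import Mathlib
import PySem

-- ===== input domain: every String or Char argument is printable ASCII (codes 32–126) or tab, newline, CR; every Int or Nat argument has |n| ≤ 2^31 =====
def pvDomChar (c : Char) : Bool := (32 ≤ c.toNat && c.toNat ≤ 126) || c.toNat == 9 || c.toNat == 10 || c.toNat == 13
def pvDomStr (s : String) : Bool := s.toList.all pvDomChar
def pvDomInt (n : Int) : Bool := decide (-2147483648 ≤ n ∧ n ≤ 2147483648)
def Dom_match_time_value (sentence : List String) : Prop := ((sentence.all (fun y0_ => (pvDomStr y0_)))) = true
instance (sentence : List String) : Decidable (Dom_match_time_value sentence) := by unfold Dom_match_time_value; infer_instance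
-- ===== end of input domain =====

-- B replaces A's outer loop over the 18 keywords (each rescanning the sentence) with ONE pass
-- over the sentence testing set membership (objective: faster, one traversal instead of 18).

-- the keyword set literal of both Pythons, in source order (note the source's 'months' 'year'
-- string concatenation: the set contains 'monthsyear', not 'year')
def pvKw : List String :=
  ["minutes", "minute", "second", "seconds", "day", "days", "month", "months",
   "monthsyear", "years", "hour", "hours", "min", "h", "hr", "hrs", "d", "s"]

-- ===== PORT A =====
-- Python iterates a set (hash order, not modelled by PySem.Set): the port iterates the set's
-- elements in insertion order; exact on Pre_ (at most one distinct keyword occurs), where the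
-- result does not depend on the iteration order.
def match_time_value (sentence : List String) : List (Int × Int × String × String) :=
  let keyword_set : PySem.Set String := PySem.Set.ofList pvKw
  let rst : List (Int × Int × String × String) := []
  if PySem.List.len sentence ≤ 1 then rst else
  keyword_set.foldl (fun rst keyw =>
    -- keyw.split(' '): sep ≠ "", so split? is never none; .getD [] only totalizes
    let len_keyw : Int := PySem.List.len ((PySem.Str.split? keyw " ").getD [])
    (PySem.List.pyRange 0 (PySem.List.len sentence - len_keyw)).foldl (fun rst i =>
      -- sentence[i+j]: always in range here (0 ≤ i, i + len_keyw ≤ len), so pyGetD is exact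
      let words : List String :=
        (PySem.List.pyRange 0 len_keyw).foldl
          (fun ws j => ws ++ [PySem.List.pyGetD sentence (i + j) ""]) []
      let words : String := PySem.Str.join " " words
      if words == keyw then rst ++ [(i, i + len_keyw, "TV", keyw)] else rst) rst) rst

-- ===== PORT B =====
def match_time_value_alt (sentence : List String) : List (Int × Int × String × String) :=
  let keyword_set : PySem.Set String := PySem.Set.ofList pvKw
  if PySem.List.len sentence ≤ 1 then [] else
  (PySem.List.enumerate (PySem.List.slice sentence none (some (-1)))).filterMap
    (fun p => if PySem.Set.contains keyword_set p.2
              then some (p.1, p.1 + 1, "TV", p.2) else none)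

-- ===== PRECONDITION & SPEC =====
-- Pre_ excludes sentences in which two or more DISTINCT keywords occur (among all words but the
-- last): there A's output order is the iteration order of a Python set of strings, which varies
-- with PYTHONHASHSEED — an accident of A's implementation that no port can pin down.
def Pre_match_time_value (sentence : List String) : Prop :=
  (pvKw.filter (fun w => sentence.dropLast.contains w)).length ≤ 1
instance (sentence : List String) : Decidable (Pre_match_time_value sentence) := by
  unfold Pre_match_time_value; infer_instance
def pvWitness_match_time_value : List String := ["5", "minutes", "ago"]

def Spec_match_time_value (sentence : List String) (out : List (Int × Int × String × String)) : Prop := out = match_time_value_alt sentence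
instance (sentence : List String) (out : List (Int × Int × String × String)) : Decidable (Spec_match_time_value sentence out) := by unfold Spec_match_time_value; infer_instance

-- ===== CLAIM (what is proved, stated in full; the proofs are below) =====
def Claim_equal_match_time_value : Prop := ∀ (sentence : List String), Dom_match_time_value sentence → Pre_match_time_value sentence → Spec_match_time_value sentence (match_time_value sentence)

-- ===== LEMMAS AND PROOFS =====

theorem pvKw_ofList : PySem.Set.ofList pvKw = pvKw := by decide

theorem pvKw_nodup : pvKw.Nodup := by decide

theorem pvKw_split_len : ∀ w ∈ pvKw, PySem.List.len ((PySem.Str.split? w " ").getD []) = 1 := by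
  decide

-- the per-keyword block A appends: all match positions of w, left to right
def pvMatches (sentence : List String) (w : String) : List (Int × Int × String × String) :=
  ((PySem.List.pyRange 0 ((sentence.length : Int) - 1)).filter
      (fun i => PySem.List.pyGetD sentence i "" == w)).map
    (fun i => (i, i + 1, "TV", w))

theorem pvRange01 : PySem.List.pyRange 0 1 = [0] := by decide

theorem pvJoin_singleton (s : String) : PySem.Str.join " " [s] = s := by
  simp [PySem.Str.join, PySem.Chars.join_singleton]

theorem A_eq (sentence : List String) (hn : ¬ PySem.List.len sentence ≤ 1) :
    match_time_value sentence = pvKw.flatMap (pvMatches sentence) := by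
  unfold match_time_value
  rw [pvKw_ofList, if_neg hn]
  trans (List.foldl (fun rst w => rst ++ pvMatches sentence w) [] pvKw)
  · apply PySem.List.foldl_congr_mem
    intro acc w hw
    simp only [pvKw_split_len w hw]
    have hlen : PySem.List.len sentence - 1 = (sentence.length : Int) - 1 := by
      simp [PySem.List.len]
    rw [hlen, pvRange01]
    simp only [List.foldl_cons, List.foldl_nil, List.nil_append, add_zero]
    calc (PySem.List.pyRange 0 ((sentence.length : Int) - 1)).foldl
            (fun rst i =>
              if (PySem.Str.join " " [PySem.List.pyGetD sentence i ""] == w) = true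
              then rst ++ [(i, i + 1, "TV", w)] else rst) acc
        = (PySem.List.pyRange 0 ((sentence.length : Int) - 1)).foldl
            (fun rst i =>
              if (PySem.List.pyGetD sentence i "" == w) = true
              then rst ++ [(i, i + 1, "TV", w)] else rst) acc := by
            apply PySem.List.foldl_congr_mem
            intro a i _
            simp only [pvJoin_singleton]
      _ = acc ++ pvMatches sentence w := PySem.List.foldl_append_if _ _ _ _
  · rw [PySem.List.foldl_append_eq_flatMap, List.nil_append]

theorem B_eq (sentence : List String) (hn : ¬ PySem.List.len sentence ≤ 1) :
    match_time_value_alt sentence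
      = (PySem.List.pyRange 0 ((sentence.length : Int) - 1)).filterMap
          (fun i => if pvKw.contains (PySem.List.pyGetD sentence i "")
                    then some (i, i + 1, "TV", PySem.List.pyGetD sentence i "") else none) := by
  have hlen1 : 1 ≤ sentence.length := by
    simp [PySem.List.len] at hn; omega
  unfold match_time_value_alt
  rw [pvKw_ofList, if_neg hn, PySem.List.slice_to_neg_one,
      PySem.List.enumerate_eq_map_pyRange _ "", List.filterMap_map]
  have hdl : PySem.List.len sentence.dropLast = (sentence.length : Int) - 1 := by
    simp [PySem.List.len, List.length_dropLast]; omega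
  rw [hdl]
  apply List.filterMap_congr
  intro i hi
  rw [PySem.List.mem_pyRange_one] at hi
  have h0 : 0 ≤ i := hi.1
  have h1 : i < (sentence.dropLast.length : Int) := by
    rw [List.length_dropLast]; omega
  have h1' : i < (sentence.length : Int) := by omega
  have hg : PySem.List.pyGetD sentence.dropLast i "" = PySem.List.pyGetD sentence i "" := by
    rw [PySem.List.pyGetD_eq_getElem _ _ h0 h1, PySem.List.pyGetD_eq_getElem _ _ h0 h1',
        List.getElem_dropLast]
  simp only [Function.comp, hg, PySem.Set.contains, List.contains_eq_mem]

-- element i of the scanned prefix is a member of sentence.dropLast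
theorem pv_get_mem (sentence : List String) {i : Int} (h0 : 0 ≤ i)
    (h1 : i < (sentence.length : Int) - 1) :
    PySem.List.pyGetD sentence i "" ∈ sentence.dropLast := by
  have hlt : i < (sentence.dropLast.length : Int) := by
    rw [List.length_dropLast]; omega
  have hlt' : i < (sentence.length : Int) := by omega
  rw [← (by rw [PySem.List.pyGetD_eq_getElem _ _ h0 hlt, PySem.List.pyGetD_eq_getElem _ _ h0 hlt',
          List.getElem_dropLast] :
        PySem.List.pyGetD sentence.dropLast i "" = PySem.List.pyGetD sentence i "")]
  rw [PySem.List.pyGetD_eq_getElem _ _ h0 hlt]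
  exact List.getElem_mem _

theorem pv_flatMap_single {α β : Type} [DecidableEq α] (l : List α) (f : α → List β) (w0 : α)
    (hmem : w0 ∈ l) (hnd : l.Nodup) (h : ∀ w ∈ l, w ≠ w0 → f w = []) :
    l.flatMap f = f w0 := by
  induction l with
  | nil => cases hmem
  | cons a l ih =>
    rw [List.flatMap_cons]
    rcases List.nodup_cons.mp hnd with ⟨ha, hnd'⟩
    by_cases haw : a = w0
    · subst haw
      have : l.flatMap f = [] := by
        rw [List.flatMap_eq_nil_iff]
        intro w hw
        exact h w (List.mem_cons_of_mem _ hw) (fun e => ha (e ▸ hw))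
      rw [this, List.append_nil]
    · rw [h a (List.mem_cons_self) haw, List.nil_append]
      have hm : w0 ∈ l := by
        rcases List.mem_cons.mp hmem with h' | h'
        · exact absurd h'.symm haw
        · exact h'
      exact ih hm hnd' (fun w hw => h w (List.mem_cons_of_mem _ hw))

theorem pv_filter_map_eq_filterMap {α β : Type} (l : List α) (p : α → Bool) (f : α → β) :
    (l.filter p).map f = l.filterMap (fun x => if p x then some (f x) else none) := by
  induction l with
  | nil => rfl
  | cons a l ih =>
    by_cases h : p a = true <;> simp [h, ih]

theorem pv_main (sentence : List String) (hp : Pre_match_time_value sentence) :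
    match_time_value sentence = match_time_value_alt sentence := by
  by_cases hn : PySem.List.len sentence ≤ 1
  · unfold match_time_value match_time_value_alt
    rw [if_pos hn, if_pos hn]
  · rw [A_eq sentence hn, B_eq sentence hn]
    unfold Pre_match_time_value at hp
    set t := sentence.dropLast with ht
    -- membership consequences of the filter's length bound
    have hocc : ∀ w ∈ pvKw, ∀ w' ∈ pvKw, w ∈ t → w' ∈ t → w = w' := by
      intro w hw w' hw' hwt hw't
      by_contra hne
      rcases Nat.lt_or_ge (pvKw.filter (fun w => t.contains w)).length 2 with h2 | h2
      · -- the filter contains both w and w', distinct: length ≥ 2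
        have hwf : w ∈ pvKw.filter (fun w => t.contains w) := by
          rw [List.mem_filter]; exact ⟨hw, by rw [List.contains_eq_mem]; simpa using hwt⟩
        have hw'f : w' ∈ pvKw.filter (fun w => t.contains w) := by
          rw [List.mem_filter]; exact ⟨hw', by rw [List.contains_eq_mem]; simpa using hw't⟩
        interval_cases h : (pvKw.filter (fun w => t.contains w)).length
        · rw [List.length_eq_zero_iff] at h
          rw [h] at hwf; cases hwf
        · rcases List.length_eq_one_iff.mp h with ⟨x, hx⟩
          rw [hx] at hwf hw'f
          simp at hwf hw'f
          exact hne (hwf.trans hw'f.symm)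
      · omega
    have hcases : (pvKw.filter (fun w => t.contains w)) = []
        ∨ ∃ w0, (pvKw.filter (fun w => t.contains w)) = [w0] := by
      match h : pvKw.filter (fun w => t.contains w) with
      | [] => exact Or.inl rfl
      | [w0] => exact Or.inr ⟨w0, rfl⟩
      | _ :: _ :: _ => rw [h] at hp; simp at hp
    rcases hcases with h0 | ⟨w0, h1⟩
    · -- no keyword occurs: both sides empty
      have hno : ∀ w ∈ pvKw, w ∉ t := by
        intro w hw hwt
        have : w ∈ pvKw.filter (fun w => t.contains w) := by
          rw [List.mem_filter]; exact ⟨hw, by rw [List.contains_eq_mem]; simpa using hwt⟩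
        rw [h0] at this; cases this
      rw [List.flatMap_eq_nil_iff.mpr, List.filterMap_eq_nil_iff.mpr]
      · intro i hi
        rw [PySem.List.mem_pyRange_one] at hi
        rw [if_neg]
        intro hc
        rw [List.contains_eq_mem] at hc
        exact hno _ (by simpa using hc) (pv_get_mem sentence hi.1 hi.2)
      · intro w hw
        unfold pvMatches
        rw [List.map_eq_nil_iff, List.filter_eq_nil_iff]
        intro i hi hb
        rw [PySem.List.mem_pyRange_one] at hi
        have := pv_get_mem sentence hi.1 hi.2
        rw [beq_iff_eq] at hb
        exact hno w hw (hb ▸ this)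
    · -- exactly one keyword w0 occurs
      have hw0 : w0 ∈ pvKw ∧ w0 ∈ t := by
        have : w0 ∈ pvKw.filter (fun w => t.contains w) := by rw [h1]; exact List.mem_cons_self
        rw [List.mem_filter] at this
        exact ⟨this.1, by have := this.2; rw [List.contains_eq_mem] at this; simpa using this⟩
      have huniq : ∀ w ∈ pvKw, w ∈ t → w = w0 := fun w hw hwt =>
        hocc w hw w0 hw0.1 hwt hw0.2
      rw [pv_flatMap_single pvKw (pvMatches sentence) w0 hw0.1 pvKw_nodup ?_]
      · unfold pvMatches
        rw [pv_filter_map_eq_filterMap]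
        apply List.filterMap_congr
        intro i hi
        rw [PySem.List.mem_pyRange_one] at hi
        have hmem := pv_get_mem sentence hi.1 hi.2
        by_cases he : PySem.List.pyGetD sentence i "" = w0
        · rw [if_pos (by rw [beq_iff_eq]; exact he),
              if_pos (by rw [List.contains_eq_mem]; simp [he ▸ hw0.1]), he]
        · rw [if_neg (by rw [beq_iff_eq]; exact he), if_neg]
          intro hc
          rw [List.contains_eq_mem] at hc
          exact he (huniq _ (by simpa using hc) hmem)
      · intro w hw hne
        unfold pvMatches
        rw [List.map_eq_nil_iff, List.filter_eq_nil_iff]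
        intro i hi hb
        rw [PySem.List.mem_pyRange_one] at hi
        rw [beq_iff_eq] at hb
        exact hne (huniq w hw (hb ▸ pv_get_mem sentence hi.1 hi.2))

-- ===== VERDICT (by name: the statement is the Claim_ definition above) =====
theorem match_time_value_spec : Claim_equal_match_time_value := by
  intro sentence _ hp
  unfold Spec_match_time_value
  exact pv_main sentence hp
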